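-- pv_equiv track=rewrite | github.com/GitVexy/algorithms | ch06/l01.py | count_marketers
-- ===== SOURCE A (Python) =====
-- def count_marketers(
--         job_titles: list[str]
-- ) -> int:
--     if not job_titles:
--         return 0
--
--     count = 0
--     if job_titles[-1].lower() == "marketer":
--         count += 1
--
--     count += count_marketers(job_titles[:-1])
--
--     return count
-- ===== SOURCE B (Python) =====
-- def count_marketers(job_titles: list[str]) -> int:
--     count = 0
--     for title in job_titles:
--         if title.lower() == "marketer":
--             count += 1
--     return count
-- ===== Notes on version B (the rewrite author's own statement) =====
-- stated objective: simpler
-- what changed: Replaced the self-recursion on job_titles[:-1] (which copies a list slice at every step) with a single iterative pass accumulating the count.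
import Mathlib
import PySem

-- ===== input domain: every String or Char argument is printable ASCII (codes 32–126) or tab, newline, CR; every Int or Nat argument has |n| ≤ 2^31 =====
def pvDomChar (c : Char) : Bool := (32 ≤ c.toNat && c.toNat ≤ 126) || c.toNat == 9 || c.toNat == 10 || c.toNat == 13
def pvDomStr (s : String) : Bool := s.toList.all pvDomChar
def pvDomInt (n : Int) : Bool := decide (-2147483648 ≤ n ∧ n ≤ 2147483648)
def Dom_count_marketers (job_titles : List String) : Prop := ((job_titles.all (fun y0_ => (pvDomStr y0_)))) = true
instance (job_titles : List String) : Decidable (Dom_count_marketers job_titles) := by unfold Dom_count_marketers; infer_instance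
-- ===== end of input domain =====

-- B replaces A's self-recursion on job_titles[:-1] with a single iterative pass (simpler, avoids repeated slicing).


-- ===== PORT A =====
def count_marketers (job_titles : List String) : Int :=
  if _h : job_titles = [] then 0
  else
    let count : Int := 0
    let count := if PySem.Str.lower (PySem.List.pyGetD job_titles (-1) "") == "marketer" then count + 1 else count
    let count := count + count_marketers (PySem.List.slice job_titles none (some (-1)))
    count
termination_by job_titles.length
decreasing_by
  simp [PySem.List.slice_to_neg_one]
  cases job_titles with
  | nil => exact absurd rfl _h
  | cons x xs => simp

-- ===== PORT B =====
def count_marketers_alt (job_titles : List String) : Int :=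
  job_titles.foldl (fun count title => if PySem.Str.lower title == "marketer" then count + 1 else count) 0

-- ===== PRECONDITION & SPEC =====
def Spec_count_marketers (job_titles : List String) (out : Int) : Prop := out = count_marketers_alt job_titles
instance (job_titles : List String) (out : Int) : Decidable (Spec_count_marketers job_titles out) := by unfold Spec_count_marketers; infer_instance

-- ===== CLAIM (what is proved, stated in full; the proofs are below) =====
def Claim_equal_count_marketers : Prop := ∀ (job_titles : List String), Dom_count_marketers job_titles → Spec_count_marketers job_titles (count_marketers job_titles)

-- ===== LEMMAS AND PROOFS =====

theorem foldl_count_shift (xs : List String) (c : Int) :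
    xs.foldl (fun count title => if PySem.Str.lower title == "marketer" then count + 1 else count) c
      = c + xs.foldl (fun count title => if PySem.Str.lower title == "marketer" then count + 1 else count) 0 := by
  induction xs generalizing c with
  | nil => simp
  | cons x xs ih =>
    simp only [List.foldl_cons]
    rw [ih, ih (if PySem.Str.lower x == "marketer" then (0:Int) + 1 else 0)]
    split <;> ring

theorem count_marketers_eq_alt (job_titles : List String) :
    count_marketers job_titles = count_marketers_alt job_titles := by
  induction job_titles using List.reverseRecOn with
  | nil => simp [count_marketers, count_marketers_alt]
  | append_singleton xs x ih =>
    rw [count_marketers]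
    simp only [PySem.List.pyGetD_neg_one_append_singleton, PySem.List.slice_to_neg_one,
      List.dropLast_concat]
    have hne : xs ++ [x] ≠ [] := by simp
    simp only [dif_neg hne, ih]
    unfold count_marketers_alt
    rw [List.foldl_append]
    simp only [List.foldl_cons, List.foldl_nil]
    rw [foldl_count_shift]
    split <;> ring

-- ===== VERDICT (by name: the statement is the Claim_ definition above) =====
theorem count_marketers_spec : Claim_equal_count_marketers := by
  intro xs _
  exact count_marketers_eq_alt xs
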